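-- pv_equiv track=rewrite | github.com/4869jfcggr-coder/hatchSmith | hatchSmithmain.py | diag_coords_d2
-- ===== SOURCE A (Python) =====
-- def diag_coords_d2(w,h,idx):
--     coords=[]
--     x0=max(0,idx-(h-1))
--     y0=idx-x0-(h-1)
--     x=x0
--     y=y0
--     while x<w and y<h:
--         if y>=0:
--             coords.append((x,y))
--         x+=1
--         y+=1
--     return coords
-- ===== SOURCE B (Python) =====
-- def diag_coords_d2(w, h, idx):
--     # The diagonal enters y=0 at x = |idx-h+1| and has min(w-a, h) visible cells.
--     # Build the result back-to-front, from the last cell down to (a, 0), then reverse.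
--     a = abs(idx - h + 1)
--     k = min(w - a, h) - 1
--     rev = []
--     while k >= 0:
--         rev.append((a + k, k))
--         k -= 1
--     rev.reverse()
--     return rev
-- ===== Notes on version B (the rewrite author's own statement) =====
-- stated objective: alternative
-- what changed: B replaces A's forward cell-by-cell diagonal walk (which also scans the negative-y cells before the visible region) by a closed-form span (start x=|idx-h+1|, length min(w-a,h)) built back-to-front from the last cell by a count-down loop and reversed once at the end.
import Mathlib
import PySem

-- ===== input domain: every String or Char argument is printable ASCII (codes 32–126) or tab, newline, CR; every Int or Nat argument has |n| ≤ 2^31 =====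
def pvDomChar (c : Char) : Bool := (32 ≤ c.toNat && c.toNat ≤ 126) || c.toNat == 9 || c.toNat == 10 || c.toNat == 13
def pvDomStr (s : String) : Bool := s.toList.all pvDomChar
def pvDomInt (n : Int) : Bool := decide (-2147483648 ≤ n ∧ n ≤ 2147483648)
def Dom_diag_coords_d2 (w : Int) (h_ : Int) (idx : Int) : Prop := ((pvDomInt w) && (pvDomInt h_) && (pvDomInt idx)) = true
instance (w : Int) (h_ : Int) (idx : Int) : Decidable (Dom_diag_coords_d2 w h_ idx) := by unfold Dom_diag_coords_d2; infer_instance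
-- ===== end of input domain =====

-- B computes the visible span in closed form and builds the list back-to-front (then one reverse), instead of A's cell-by-cell forward walk from the (possibly negative-y) diagonal start; A is total, so no Pre_.

-- ===== PORT A =====
-- the while loop of A: x,y step by +1 until x<w ∧ y<h fails; append (x,y) when y≥0
def diagLoopA (w h_ : Int) (x y : Int) (acc : List (Int × Int)) : List (Int × Int) :=
  if _h : x < w ∧ y < h_ then
    diagLoopA w h_ (x + 1) (y + 1) (if y ≥ 0 then acc ++ [(x, y)] else acc)
  else acc
termination_by (w - x).toNat
decreasing_by omega

def diag_coords_d2 (w : Int) (h_ : Int) (idx : Int) : List (Int × Int) :=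
  let x0 : Int := max 0 (idx - (h_ - 1))
  let y0 : Int := idx - x0 - (h_ - 1)
  diagLoopA w h_ x0 y0 []

-- ===== PORT B =====
-- B's while loop: k counts down from the last cell index to 0, appending (a+k, k) to rev
def diagLoopB (a : Int) (k : Int) (rev : List (Int × Int)) : List (Int × Int) :=
  if _h : k ≥ 0 then diagLoopB a (k - 1) (rev ++ [(a + k, k)]) else rev
termination_by (k + 1).toNat
decreasing_by omega

def diag_coords_d2_alt (w : Int) (h_ : Int) (idx : Int) : List (Int × Int) :=
  let a : Int := |idx - h_ + 1|
  (diagLoopB a (min (w - a) h_ - 1) []).reverse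

-- ===== PRECONDITION & SPEC =====
def Spec_diag_coords_d2 (w : Int) (h_ : Int) (idx : Int) (out : List (Int × Int)) : Prop := out = diag_coords_d2_alt w h_ idx
instance (w : Int) (h_ : Int) (idx : Int) (out : List (Int × Int)) : Decidable (Spec_diag_coords_d2 w h_ idx out) := by unfold Spec_diag_coords_d2; infer_instance

-- ===== CLAIM (what is proved, stated in full; the proofs are below) =====
def Claim_equal_diag_coords_d2 : Prop := ∀ (w : Int) (h_ : Int) (idx : Int), Dom_diag_coords_d2 w h_ idx → Spec_diag_coords_d2 w h_ idx (diag_coords_d2 w h_ idx)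

-- ===== LEMMAS AND PROOFS =====

-- closed form of A's loop: points t with x ≤ t, x - y ≤ t (i.e. current y ≥ 0), t < w, t < x + (h - y)
theorem diagLoopA_spec (w h_ : Int) : ∀ (x y : Int) (acc : List (Int × Int)),
    diagLoopA w h_ x y acc
      = acc ++ (PySem.List.pyRange (max x (x - y)) (min w (x + (h_ - y))) 1).map
          (fun t => (t, t + (y - x))) := by
  intro x y acc
  induction hfuel : (w - x).toNat using Nat.strong_induction_on generalizing x y acc with
  | _ n ih =>
    rw [diagLoopA]
    by_cases hc : x < w ∧ y < h_
    · rw [dif_pos hc, ih ((w - (x+1)).toNat) (by omega) (x+1) (y+1) _ rfl]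
      simp only [show (y + 1) - (x + 1) = y - x from by ring]
      by_cases hy : y ≥ 0
      · rw [if_pos hy]
        have h2 : max (x+1) ((x+1) - (y+1)) = x + 1 := by omega
        have h3 : min w ((x+1) + (h_ - (y+1))) = min w (x + (h_ - y)) := by omega
        have h1 : max x (x - y) = x := by omega
        rw [h2, h3, h1, PySem.List.pyRange_one_cons (by omega : x < min w (x + (h_ - y)))]
        simp only [List.map_cons, List.append_assoc, List.cons_append, List.nil_append,
          show x + (y - x) = y from by ring]
      · rw [if_neg hy]
        have h2 : max (x+1) ((x+1) - (y+1)) = max x (x - y) := by omega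
        have h3 : min w ((x+1) + (h_ - (y+1))) = min w (x + (h_ - y)) := by omega
        rw [h2, h3]
    · rw [dif_neg hc, PySem.List.pyRange_one_eq_nil (by omega)]
      simp

-- closed form of B's loop: rev followed by the cells (a+k,k), (a+k-1,k-1), …, (a,0) — the span reversed
theorem diagLoopB_spec (a : Int) : ∀ (k : Int) (rev : List (Int × Int)),
    diagLoopB a k rev
      = rev ++ ((PySem.List.pyRange a (a + k + 1) 1).map (fun t => (t, t - a))).reverse := by
  intro k rev
  induction hfuel : (k + 1).toNat using Nat.strong_induction_on generalizing k rev with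
  | _ n ih =>
    rw [diagLoopB]
    by_cases hk : k ≥ 0
    · rw [dif_pos hk, ih ((k - 1 + 1).toNat) (by omega) (k - 1) _ rfl,
        show a + (k - 1) + 1 = a + k from by ring,
        show a + k + 1 = (a + k) + 1 from rfl,
        PySem.List.pyRange_one_succ_right (by omega : a ≤ a + k)]
      simp only [List.map_append, List.map_cons, List.map_nil, List.reverse_append,
        List.reverse_cons, List.reverse_nil, List.nil_append, List.append_assoc,
        List.cons_append, show a + k - a = k from by ring]
    · rw [dif_neg hk, PySem.List.pyRange_one_eq_nil (by omega)]
      simp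

-- ===== VERDICT (by name: the statement is the Claim_ definition above) =====
theorem diag_coords_d2_spec : Claim_equal_diag_coords_d2 := by
  intro w h_ idx _
  unfold Spec_diag_coords_d2 diag_coords_d2 diag_coords_d2_alt
  simp only []
  rw [diagLoopA_spec, List.nil_append, diagLoopB_spec, List.nil_append, List.reverse_reverse]
  set a : Int := |idx - h_ + 1| with ha
  set x0 : Int := max 0 (idx - (h_ - 1)) with hx0
  have haval : a = |idx - h_ + 1| := ha
  have hrange : PySem.List.pyRange (max x0 (x0 - (idx - x0 - (h_ - 1)))) (min w (x0 + (h_ - (idx - x0 - (h_ - 1))))) 1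
      = PySem.List.pyRange a (a + (min (w - a) h_ - 1) + 1) 1 := by
    rcases abs_cases (idx - h_ + 1) with ⟨h1, h2⟩ | ⟨h1, h2⟩ <;>
    · rw [show max x0 (x0 - (idx - x0 - (h_ - 1))) = a from by omega,
        show min w (x0 + (h_ - (idx - x0 - (h_ - 1)))) = a + (min (w - a) h_ - 1) + 1 from by omega]
  rw [hrange]
  refine List.map_congr_left fun t ht => ?_
  have := (PySem.List.mem_pyRange_one).mp ht
  simp only [Prod.mk.injEq, true_and]
  rcases abs_cases (idx - h_ + 1) with ⟨h1, h2⟩ | ⟨h1, h2⟩ <;> omega
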